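-- pv_equiv track=rewrite | github.com/Koshsky/NetDevConfigurator | src/database/services/firmware_service.py | determine_firmware_type
-- ===== SOURCE A (Python) =====
-- def determine_firmware_type(firmware_name: str) -> str:
--     # первичная: .bl1
--     # вторичная: .uboot .boot
--     # сама прошивка: .firmware .iss .ros
--
--     primary = "primary_bootloader"
--     secondary = "secondary_bootloader"
--     firmware = "firmware"
--
--     firmware_types = {
--         ".bl1": primary,
--         ".uboot": secondary,
--         ".boot": secondary,
--         ".firmware": firmware,
--         ".iss": firmware,
--         ".ros": firmware,
--     }
--
--     return next(
--         (
--             description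
--             for extension, description in firmware_types.items()
--             if firmware_name.endswith(extension)
--         ),
--         "UKNOWN",
--     )
-- ===== SOURCE B (Python) =====
-- FIRMWARE_TYPES = {
--     ".bl1": "primary_bootloader",
--     ".uboot": "secondary_bootloader",
--     ".boot": "secondary_bootloader",
--     ".firmware": "firmware",
--     ".iss": "firmware",
--     ".ros": "firmware",
-- }
--
--
-- def determine_firmware_type(firmware_name: str) -> str:
--     # Single keyed lookup on the dot-boundary extension instead of a linear
--     # scan of endswith tests.
--     if "." not in firmware_name:
--         return "UKNOWN"
--     ext = "." + firmware_name.rsplit(".", 1)[-1]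
--     return FIRMWARE_TYPES.get(ext, "UKNOWN")
-- ===== Notes on version B (the rewrite author's own statement) =====
-- stated objective: idiomatic
-- what changed: B extracts the filename's dot-boundary extension once and answers with a single dict lookup, instead of A's linear scan testing endswith against every known suffix.
import Mathlib
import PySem

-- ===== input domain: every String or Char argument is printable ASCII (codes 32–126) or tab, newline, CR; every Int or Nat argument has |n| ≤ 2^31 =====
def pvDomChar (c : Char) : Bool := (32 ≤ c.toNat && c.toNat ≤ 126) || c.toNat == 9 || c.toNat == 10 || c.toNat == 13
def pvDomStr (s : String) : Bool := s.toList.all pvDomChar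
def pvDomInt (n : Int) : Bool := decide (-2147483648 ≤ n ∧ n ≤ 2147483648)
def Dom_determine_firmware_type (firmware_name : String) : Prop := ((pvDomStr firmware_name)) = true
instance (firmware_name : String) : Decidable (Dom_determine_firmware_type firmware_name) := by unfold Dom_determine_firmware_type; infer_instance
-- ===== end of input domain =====

-- B replaces A's linear endswith scan over all known suffixes by extracting the
-- last-dot extension once and doing a single dict lookup (objective: idiomatic).

-- ===== PORT A =====
-- the dict A iterates over, in insertion order
def fwPairs : List (String × String) :=
  [(".bl1", "primary_bootloader"),
   (".uboot", "secondary_bootloader"),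
   (".boot", "secondary_bootloader"),
   (".firmware", "firmware"),
   (".iss", "firmware"),
   (".ros", "firmware")]

-- next((d for e, d in … if name.endswith(e)), "UKNOWN"): first matching description
def fwFirstMatch (firmware_name : String) : List (String × String) → String
  | [] => "UKNOWN"
  | (e, d) :: rest =>
      if PySem.Str.endswith firmware_name e then d else fwFirstMatch firmware_name rest

def determine_firmware_type (firmware_name : String) : String :=
  fwFirstMatch firmware_name fwPairs

-- ===== PORT B =====
def fwDict : PySem.Dict String String :=
  PySem.Dict.ofList
    [(".bl1", "primary_bootloader"),
     (".uboot", "secondary_bootloader"),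
     (".boot", "secondary_bootloader"),
     (".firmware", "firmware"),
     (".iss", "firmware"),
     (".ros", "firmware")]

-- '.' + name.rsplit('.', 1)[-1]: the suffix after the LAST dot, ported by hand
-- (exact: reverse, take the dotless prefix, reverse back), then one dict lookup.
def determine_firmware_type_alt (firmware_name : String) : String :=
  let cs := firmware_name.toList
  if '.' ∈ cs then
    let ext : String := String.ofList ('.' :: (cs.reverse.takeWhile (· ≠ '.')).reverse)
    PySem.Dict.getD fwDict ext "UKNOWN"
  else
    "UKNOWN"

-- ===== PRECONDITION & SPEC =====
def Spec_determine_firmware_type (firmware_name : String) (out : String) : Prop := out = determine_firmware_type_alt firmware_name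
instance (firmware_name : String) (out : String) : Decidable (Spec_determine_firmware_type firmware_name out) := by unfold Spec_determine_firmware_type; infer_instance

-- ===== CLAIM (what is proved, stated in full; the proofs are below) =====
def Claim_equal_determine_firmware_type : Prop := ∀ (firmware_name : String), Dom_determine_firmware_type firmware_name → Spec_determine_firmware_type firmware_name (determine_firmware_type firmware_name)

-- ===== LEMMAS AND PROOFS =====

-- (k ++ ['.']) is a prefix of r, for dotless k, iff r's maximal dotless prefix is k
lemma prefix_dot_iff (k : List Char) (r : List Char) (hk : '.' ∉ k) :
    (k ++ ['.']) <+: r ↔ ('.' ∈ r ∧ r.takeWhile (· ≠ '.') = k) := by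
  induction k generalizing r with
  | nil =>
    cases r with
    | nil => simp
    | cons c r' =>
      by_cases hc : c = '.'
      · subst hc; simp [List.cons_prefix_cons]
      · simp [List.cons_prefix_cons, hc, Ne.symm hc]
  | cons a k' ih =>
    have ha : a ≠ '.' := fun h => hk (by simp [h])
    have hk' : '.' ∉ k' := fun h => hk (List.mem_cons_of_mem a h)
    cases r with
    | nil => simp
    | cons c r' =>
      by_cases hc : c = '.'
      · subst hc
        simp [List.cons_prefix_cons]
        intro h; exact absurd h ha
      · simp [List.cons_prefix_cons, hc, ih r' hk']
        tauto

-- name.endswith('.'+t), t dotless, iff name contains a dot and its last-dot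
-- extension (computed as B does) is t
lemma ends_iff (cs t : List Char) (ht : '.' ∉ t) :
    PySem.Chars.endswith cs ('.' :: t) = true ↔
      ('.' ∈ cs ∧ (cs.reverse.takeWhile (· ≠ '.')).reverse = t) := by
  rw [PySem.Chars.endswith_iff]
  have h1 : ('.' :: t) <:+ cs ↔ (t.reverse ++ ['.']) <+: cs.reverse := by
    constructor
    · intro h
      have := List.reverse_prefix.mpr h
      simpa using this
    · intro h
      have : ('.' :: t).reverse <+: cs.reverse := by simpa using h
      exact List.reverse_prefix.mp this
  rw [h1, prefix_dot_iff _ _ (by simpa using ht)]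
  constructor
  · rintro ⟨h2, h3⟩
    exact ⟨List.mem_reverse.mp h2, by rw [h3]; simp⟩
  · rintro ⟨h2, h3⟩
    refine ⟨List.mem_reverse.mpr h2, ?_⟩
    have := congrArg List.reverse h3
    simpa using this

theorem determine_firmware_type_spec : Claim_equal_determine_firmware_type := by
  intro name _
  unfold Spec_determine_firmware_type determine_firmware_type determine_firmware_type_alt
  by_cases hdot : '.' ∈ name.toList
  · simp only [hdot, if_pos]
    set w := (name.toList.reverse.takeWhile (· ≠ '.')).reverse with hw
    have key : ∀ (t : List Char), '.' ∉ t →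
        (PySem.Chars.endswith name.toList ('.' :: t) = true ↔ w = t) := by
      intro t ht
      rw [ends_iff name.toList t ht]
      exact ⟨fun h => h.2, fun h => ⟨hdot, h⟩⟩
    have k1 : PySem.Chars.endswith name.toList ['.','b','l','1'] = true ↔ w = ['b','l','1'] :=
      key ['b','l','1'] (by decide)
    have k2 : PySem.Chars.endswith name.toList ['.','u','b','o','o','t'] = true ↔ w = ['u','b','o','o','t'] :=
      key ['u','b','o','o','t'] (by decide)
    have k3 : PySem.Chars.endswith name.toList ['.','b','o','o','t'] = true ↔ w = ['b','o','o','t'] :=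
      key ['b','o','o','t'] (by decide)
    have k4 : PySem.Chars.endswith name.toList ['.','f','i','r','m','w','a','r','e'] = true ↔ w = ['f','i','r','m','w','a','r','e'] :=
      key ['f','i','r','m','w','a','r','e'] (by decide)
    have k5 : PySem.Chars.endswith name.toList ['.','i','s','s'] = true ↔ w = ['i','s','s'] :=
      key ['i','s','s'] (by decide)
    have k6 : PySem.Chars.endswith name.toList ['.','r','o','s'] = true ↔ w = ['r','o','s'] :=
      key ['r','o','s'] (by decide)
    by_cases h1 : w = ['b','l','1']
    · rw [h1]; simp [fwFirstMatch, fwPairs, k1.mpr h1]; decide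
    have e1 := Bool.eq_false_iff.mpr (fun h => h1 (k1.mp h))
    by_cases h2 : w = ['u','b','o','o','t']
    · rw [h2]; simp [fwFirstMatch, fwPairs, e1, k2.mpr h2]; decide
    have e2 := Bool.eq_false_iff.mpr (fun h => h2 (k2.mp h))
    by_cases h3 : w = ['b','o','o','t']
    · rw [h3]; simp [fwFirstMatch, fwPairs, e1, e2, k3.mpr h3]; decide
    have e3 := Bool.eq_false_iff.mpr (fun h => h3 (k3.mp h))
    by_cases h4 : w = ['f','i','r','m','w','a','r','e']
    · rw [h4]; simp [fwFirstMatch, fwPairs, e1, e2, e3, k4.mpr h4]; decide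
    have e4 := Bool.eq_false_iff.mpr (fun h => h4 (k4.mp h))
    by_cases h5 : w = ['i','s','s']
    · rw [h5]; simp [fwFirstMatch, fwPairs, e1, e2, e3, e4, k5.mpr h5]; decide
    have e5 := Bool.eq_false_iff.mpr (fun h => h5 (k5.mp h))
    by_cases h6 : w = ['r','o','s']
    · rw [h6]; simp [fwFirstMatch, fwPairs, e1, e2, e3, e4, e5, k6.mpr h6]; decide
    have e6 := Bool.eq_false_iff.mpr (fun h => h6 (k6.mp h))
    have hfw : fwDict = PySem.Dict.mk
        [(".bl1", "primary_bootloader"),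
         (".uboot", "secondary_bootloader"),
         (".boot", "secondary_bootloader"),
         (".firmware", "firmware"),
         (".iss", "firmware"),
         (".ros", "firmware")] := by decide
    simp [fwFirstMatch, fwPairs, e1, e2, e3, e4, e5, e6, hfw, PySem.Dict.getD,
          PySem.Dict.get?, String.ext_iff,
          Ne.symm h1, Ne.symm h2, Ne.symm h3, Ne.symm h4, Ne.symm h5, Ne.symm h6]
  · simp only [hdot, if_false]
    have efalse : ∀ (t : List Char), '.' ∉ t →
        PySem.Chars.endswith name.toList ('.' :: t) = false := by
      intro t ht
      refine Bool.eq_false_iff.mpr (fun h => hdot ?_)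
      exact ((ends_iff name.toList t ht).mp h).1
    have e1 := efalse ['b','l','1'] (by decide)
    have e2 := efalse ['u','b','o','o','t'] (by decide)
    have e3 := efalse ['b','o','o','t'] (by decide)
    have e4 := efalse ['f','i','r','m','w','a','r','e'] (by decide)
    have e5 := efalse ['i','s','s'] (by decide)
    have e6 := efalse ['r','o','s'] (by decide)
    simp [fwFirstMatch, fwPairs, e1, e2, e3, e4, e5, e6]
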